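-- pv_equiv track=rewrite | github.com/Akhan521/Interview-Prep | CodePath TIP-102/Unit 3/Day 2/skyscrapers.py | build_skyscrapers
-- ===== SOURCE A (Python) =====
-- def build_skyscrapers(floors):
--     stack = []
--     skyscrapers = 0
--
--     # Iterate through each floor:
--     for floor in floors:
--         # If the stack is empty, we need to start a new skyscraper.
--         if not stack:
--             skyscrapers += 1
--             stack.append(floor)
--
--         # We can build on top of the current skyscraper if the new floor is less than or equal to the top floor.
--         elif floor <= stack[-1]:
--             stack.append(floor)
--
--         # If the new floor is taller than the top floor, we need to pop floors until we can place the new floor or start a new skyscraper.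
--         else:
--             while stack and floor > stack[-1]:
--                 stack.pop()
--             stack.append(floor)
--             skyscrapers += 1
--
--     return skyscrapers
-- ===== SOURCE B (Python) =====
-- def build_skyscrapers(floors):
--     # Stack-free: every branch of A appends the floor, so the stack top is
--     # always the previous floor; count ascents over adjacent pairs.
--     if not floors:
--         return 0
--     count = 1
--     for i in range(1, len(floors)):
--         if floors[i] > floors[i - 1]:
--             count += 1
--     return count
-- ===== Notes on version B (the rewrite author's own statement) =====
-- stated objective: simpler
-- what changed: Drops the stack and inner pop loop entirely: since A appends the current floor in every branch, the stack top is always the previous floor, so B just counts strict ascents over adjacent pairs (plus 1 for a nonempty list).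
import Mathlib
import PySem

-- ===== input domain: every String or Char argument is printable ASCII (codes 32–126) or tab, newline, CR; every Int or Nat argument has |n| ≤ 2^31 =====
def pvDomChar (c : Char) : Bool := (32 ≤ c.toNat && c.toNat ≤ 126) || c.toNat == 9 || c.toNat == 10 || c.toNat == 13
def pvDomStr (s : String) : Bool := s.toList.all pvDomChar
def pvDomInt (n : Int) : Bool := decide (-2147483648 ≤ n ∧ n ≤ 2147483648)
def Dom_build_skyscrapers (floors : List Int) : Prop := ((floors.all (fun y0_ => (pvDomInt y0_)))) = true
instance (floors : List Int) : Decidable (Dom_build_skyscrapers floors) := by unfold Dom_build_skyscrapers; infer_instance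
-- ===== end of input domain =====

-- B removes A's stack and inner pop loop: the stack top is always the previous floor, so B counts strict ascents over adjacent pairs (objective: simpler).


-- ===== PORT A =====
-- stack modelled head-as-top: Python append = cons, pop = tail, stack[-1] = head
def pvPopWhileA (floor : Int) : List Int → List Int
  | [] => []
  | t :: rest => if floor > t then pvPopWhileA floor rest else t :: rest

def pvLoopA : List Int → List Int → Int → Int
  | [], _, skyscrapers => skyscrapers
  | floor :: rest, stack, skyscrapers =>
    match stack with
    | [] => pvLoopA rest (floor :: stack) (skyscrapers + 1)
    | top :: _ =>
      if floor ≤ top then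
        pvLoopA rest (floor :: stack) skyscrapers
      else
        pvLoopA rest (floor :: pvPopWhileA floor stack) (skyscrapers + 1)

def build_skyscrapers (floors : List Int) : Int := pvLoopA floors [] 0

-- ===== PORT B =====
def pvLoopB : Int → List Int → Int → Int
  | _, [], count => count
  | prev, x :: rest, count => pvLoopB x rest (if x > prev then count + 1 else count)

def build_skyscrapers_alt (floors : List Int) : Int :=
  match floors with
  | [] => 0
  | f :: rest => pvLoopB f rest 1

-- ===== PRECONDITION & SPEC =====
def Spec_build_skyscrapers (floors : List Int) (out : Int) : Prop := out = build_skyscrapers_alt floors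
instance (floors : List Int) (out : Int) : Decidable (Spec_build_skyscrapers floors out) := by unfold Spec_build_skyscrapers; infer_instance

-- ===== CLAIM (what is proved, stated in full; the proofs are below) =====
def Claim_equal_build_skyscrapers : Prop := ∀ (floors : List Int), Dom_build_skyscrapers floors → Spec_build_skyscrapers floors (build_skyscrapers floors)

-- ===== LEMMAS AND PROOFS =====
-- Invariant: when the stack is nonempty its head is the last processed floor,
-- so A's loop computes exactly B's adjacent-pair scan.
theorem pvLoop_eq (rest : List Int) : ∀ (prev : Int) (s : List Int) (c : Int),
    pvLoopA rest (prev :: s) c = pvLoopB prev rest c := by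
  induction rest with
  | nil => intro prev s c; rfl
  | cons x xs ih =>
    intro prev s c
    by_cases h : x ≤ prev
    · simp [pvLoopA, pvLoopB, h, not_lt.mpr h, ih]
    · simp [pvLoopA, pvLoopB, h, lt_of_not_ge h, ih]

-- ===== VERDICT (by name: the statement is the Claim_ definition above) =====
theorem build_skyscrapers_spec : Claim_equal_build_skyscrapers := by
  intro floors _
  unfold Spec_build_skyscrapers build_skyscrapers build_skyscrapers_alt
  cases floors with
  | nil => rfl
  | cons f rest => simpa [pvLoopA] using pvLoop_eq rest f [] 1
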